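-- pv_equiv track=rewrite | github.com/XIA-LIYI/AI | Project 2 - Sudoku/solution.py | computeDomain
-- ===== SOURCE A (Python) =====
-- def computeDomain(x, inference):
--     possible = []
--     restriction = []
--     if (x in inference):
--         restriction = inference[x]
--     for i in range(1, 10):
--         if (i not in restriction):
--             possible.append(i)
--     return possible
-- ===== SOURCE B (Python) =====
-- def computeDomain(x, inference):
--     # gap-filling: sort the relevant blocked values, then emit the runs of
--     # free integers between consecutive blocked values (and the end sentinels)
--     blocked = sorted({r for r in inference.get(x, []) if 1 <= r <= 9})
--     out = []
--     prev = 0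
--     for b in blocked + [10]:
--         out.extend(range(prev + 1, b))
--         prev = b
--     return out
-- ===== Notes on version B (the rewrite author's own statement) =====
-- stated objective: alternative
-- what changed: B never tests membership of 1..9: it sorts the deduplicated in-range restriction values and emits the runs of consecutive free integers between successive blocked values (gap-filling between sentinels 0 and 10), whereas A scans 1..9 and does an inner membership scan of the restriction list for each candidate.
import Mathlib
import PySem

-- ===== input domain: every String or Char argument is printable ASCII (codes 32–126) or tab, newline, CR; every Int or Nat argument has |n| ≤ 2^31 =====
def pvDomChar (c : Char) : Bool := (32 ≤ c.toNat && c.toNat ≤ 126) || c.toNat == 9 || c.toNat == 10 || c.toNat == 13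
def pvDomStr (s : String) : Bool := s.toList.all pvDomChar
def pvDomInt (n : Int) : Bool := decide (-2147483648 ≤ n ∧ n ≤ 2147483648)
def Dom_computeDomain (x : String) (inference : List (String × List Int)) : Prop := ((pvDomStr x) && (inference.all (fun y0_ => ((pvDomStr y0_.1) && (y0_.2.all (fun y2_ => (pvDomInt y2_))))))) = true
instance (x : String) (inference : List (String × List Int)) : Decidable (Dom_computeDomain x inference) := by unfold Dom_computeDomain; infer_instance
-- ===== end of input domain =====

-- B replaces A's scan of 1..9 with gap-filling: sort the deduplicated in-range blocked values
-- and emit the runs of free integers between consecutive blocked values (objective: alternative algorithm).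

-- ===== PORT A =====
def computeDomain (x : String) (inference : List (String × List Int)) : List Int :=
  let d : PySem.Dict String (List Int) := PySem.Dict.mk inference
  let restriction : List Int :=
    if d.contains x then d.getD x [] else []
  (PySem.List.pyRange 1 10 1).foldl
    (fun possible i => if restriction.contains i then possible else possible ++ [i]) []

-- ===== PORT B =====
def computeDomain_alt (x : String) (inference : List (String × List Int)) : List Int :=
  let blocked : List Int :=
    PySem.List.sorted
      (PySem.Set.ofList (((PySem.Dict.mk inference).getD x []).filter
        (fun r => decide (1 ≤ r) && decide (r ≤ 9))))
      (fun v => v) false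
  let st := (blocked ++ [10]).foldl
    (fun (st : List Int × Int) b => (st.1 ++ PySem.List.pyRange (st.2 + 1) b 1, b)) ([], 0)
  st.1

-- ===== PRECONDITION & SPEC =====
def Spec_computeDomain (x : String) (inference : List (String × List Int)) (out : List Int) : Prop := out = computeDomain_alt x inference
instance (x : String) (inference : List (String × List Int)) (out : List Int) : Decidable (Spec_computeDomain x inference out) := by unfold Spec_computeDomain; infer_instance

-- ===== CLAIM (what is proved, stated in full; the proofs are below) =====
def Claim_equal_computeDomain : Prop := ∀ (x : String) (inference : List (String × List Int)), Dom_computeDomain x inference → Spec_computeDomain x inference (computeDomain x inference)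

-- ===== LEMMAS AND PROOFS =====

-- A's loop is a filter of range(1, 10)
lemma computeDomain_eq_filter (restriction : List Int) :
    (PySem.List.pyRange 1 10 1).foldl
      (fun possible i => if restriction.contains i then possible else possible ++ [i]) []
      = (PySem.List.pyRange 1 10 1).filter (fun i => ¬ restriction.contains i) := by
  have h : ∀ (l : List Int) (acc : List Int),
      l.foldl (fun possible i => if restriction.contains i then possible else possible ++ [i]) acc
        = acc ++ l.filter (fun i => ¬ restriction.contains i) := by
    intro l
    induction l with
    | nil => simp
    | cons i l ih =>
        intro acc
        simp only [List.foldl_cons, List.filter_cons]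
        rw [ih]
        by_cases hc : i ∈ restriction <;> simp [hc]
  simpa using h (PySem.List.pyRange 1 10 1) []

-- B's gap-filling fold over a strictly increasing blocked list bounded by 10
-- produces exactly the free integers between prev and 10, appended to acc.
lemma gap_fold (bs : List Int) :
    ∀ (prev : Int) (acc : List Int),
    (prev :: bs).Pairwise (· < ·) → (∀ b ∈ bs, b < 10) →
    ((bs ++ [10]).foldl
        (fun (st : List Int × Int) b => (st.1 ++ PySem.List.pyRange (st.2 + 1) b 1, b))
        (acc, prev)).1
      = acc ++ (PySem.List.pyRange (prev + 1) 10 1).filter (fun i => ¬ bs.contains i) := by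
  induction bs with
  | nil => intro prev acc _ _; simp
  | cons b bs ih =>
      intro prev acc hpw hub
      have hpb : prev < b := (List.pairwise_cons.1 hpw).1 b (by simp)
      have hpwb : (b :: bs).Pairwise (· < ·) := (List.pairwise_cons.1 hpw).2
      have hb10 : b < 10 := hub b (by simp)
      have hbs10 : ∀ c ∈ bs, c < 10 := fun c hc => hub c (by simp [hc])
      simp only [List.cons_append, List.foldl_cons]
      rw [ih b (acc ++ PySem.List.pyRange (prev + 1) b 1) hpwb hbs10]
      rw [List.append_assoc]
      congr 1
      -- split pyRange (prev+1) 10 at b and b+1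
      have hsplit1 : PySem.List.pyRange (prev + 1) 10 1
          = PySem.List.pyRange (prev + 1) b 1 ++ PySem.List.pyRange b 10 1 :=
        PySem.List.pyRange_one_append _ _ _ (by omega) (by omega)
      have hsplit2 : PySem.List.pyRange b 10 1 = b :: PySem.List.pyRange (b + 1) 10 1 :=
        PySem.List.pyRange_one_cons (by omega)
      rw [hsplit1, hsplit2]
      simp only [List.filter_append, List.filter_cons]
      have hbmem : ((b :: bs).contains b) = true := by simp
      have hlow : (PySem.List.pyRange (prev + 1) b 1).filter
          (fun i => ¬ (b :: bs).contains i) = PySem.List.pyRange (prev + 1) b 1 := by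
        apply List.filter_eq_self.2
        intro i hi
        have hib : i < b := (PySem.List.mem_pyRange_one.1 hi).2
        have : i ∉ b :: bs := by
          intro hmem
          rcases List.mem_cons.1 hmem with h | h
          · omega
          · have := (List.pairwise_cons.1 hpwb).1 i h; omega
        simpa using this
      have hhigh : (PySem.List.pyRange (b + 1) 10 1).filter (fun i => ¬ (b :: bs).contains i)
          = (PySem.List.pyRange (b + 1) 10 1).filter (fun i => ¬ bs.contains i) := by
        apply List.filter_congr
        intro i hi
        have hbi : b < i := by
          have := (PySem.List.mem_pyRange_one.1 hi).1; omega
        simp only [decide_eq_decide, List.contains_eq_mem]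
        constructor
        · intro h; simp at h ⊢; tauto
        · intro h; simp at h ⊢; exact ⟨by omega, h⟩
      rw [hlow, hhigh]
      simp

-- ===== VERDICT (by name: the statement is the Claim_ definition above) =====
theorem computeDomain_spec : Claim_equal_computeDomain := by
  intro x inference _
  show computeDomain x inference = computeDomain_alt x inference
  simp only [computeDomain, computeDomain_alt]
  set restriction : List Int :=
    if (PySem.Dict.mk inference).contains x then (PySem.Dict.mk inference).getD x [] else []
    with hres
  have hget : (PySem.Dict.mk inference).getD x [] = restriction := by
    rw [hres]
    by_cases h : (PySem.Dict.mk inference).contains x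
    · simp [h]
    · simp only [h, Bool.false_eq_true, if_false]
      exact PySem.Dict.getD_of_not_contains (PySem.Dict.mk inference) ([] : List Int)
        (by revert h; cases (PySem.Dict.mk inference).contains x <;> simp)
  rw [hget]
  set blocked : List Int :=
    PySem.List.sorted
      (PySem.Set.ofList (restriction.filter (fun r => decide (1 ≤ r) && decide (r ≤ 9))))
      (fun v => v) false with hbl
  have hpwb : blocked.Pairwise (· < ·) := PySem.List.sorted_ofList_pairwise_lt _
  have hmemb : ∀ i : Int, i ∈ blocked ↔ i ∈ restriction ∧ 1 ≤ i ∧ i ≤ 9 := by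
    intro i
    rw [hbl, PySem.List.mem_sorted, PySem.Set.mem_ofList, List.mem_filter]
    simp
  have hchain : ((0 : Int) :: blocked).Pairwise (· < ·) := by
    rw [List.pairwise_cons]
    exact ⟨fun b hb => by have := (hmemb b).1 hb; omega, hpwb⟩
  have hub : ∀ b ∈ blocked, b < 10 := fun b hb => by have := (hmemb b).1 hb; omega
  rw [computeDomain_eq_filter, gap_fold blocked 0 [] hchain hub]
  simp only [List.nil_append, zero_add]
  apply List.filter_congr
  intro i hi
  have hir := PySem.List.mem_pyRange_one.1 hi
  simp only [List.contains_eq_mem, decide_eq_decide, not_iff_not, decide_eq_true_eq]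
  rw [hmemb i]
  constructor
  · intro h; exact ⟨h, by omega, by omega⟩
  · intro h; exact h.1
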